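-- pv_equiv track=rewrite | github.com/Ziga12341/AOC-2024 | Day 14/tree.py | xmas_tree
-- ===== SOURCE A (Python) =====
-- def xmas_tree(wide, tall):
--     tree_coordinates = []
--     upper_limit = wide // 2
--     lower_limit = wide // 2
--     for y in range(tall - 1):
--         upper_limit += 1
--         lower_limit += -1
--
--         for x in range(wide):
--             if x < upper_limit and x > lower_limit:
--                 tree_coordinates.append((x, y))
--
--
--     tree_coordinates.append((wide // 2, tall - 1))
--     return tree_coordinates
-- ===== SOURCE B (Python) =====
-- def xmas_tree(wide, tall):
--     mid = wide // 2
--     coords = []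
--     for y in range(tall - 1):
--         lo = max(0, mid - y)
--         hi = min(wide, mid + y + 1)
--         coords.extend((x, y) for x in range(lo, hi))
--     coords.append((mid, tall - 1))
--     return coords
-- ===== Notes on version B (the rewrite author's own statement) =====
-- stated objective: alternative
-- what changed: Instead of scanning every x in range(wide) per row and testing it against incrementally updated upper/lower limits, B computes each row's clamped x-interval in closed form and emits exactly those coordinates; building the output list still dominates, so the cost is similar.
import Mathlib
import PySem

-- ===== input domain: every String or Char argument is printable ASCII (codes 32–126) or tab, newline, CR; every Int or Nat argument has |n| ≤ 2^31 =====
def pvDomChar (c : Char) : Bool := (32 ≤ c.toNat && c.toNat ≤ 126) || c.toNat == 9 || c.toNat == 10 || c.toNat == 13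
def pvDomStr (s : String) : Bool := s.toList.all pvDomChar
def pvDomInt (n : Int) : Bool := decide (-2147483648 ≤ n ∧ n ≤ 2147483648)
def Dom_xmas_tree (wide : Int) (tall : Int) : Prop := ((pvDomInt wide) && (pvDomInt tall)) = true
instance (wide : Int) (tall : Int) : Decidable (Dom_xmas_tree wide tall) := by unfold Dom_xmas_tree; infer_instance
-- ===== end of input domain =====

-- B replaces A's per-row scan of all x in range(wide) against incrementally updated limits
-- by emitting each row's clamped x-interval computed in closed form (objective: alternative).

-- ===== PORT A =====
-- literal port of A: outer loop carries (coords, upper_limit, lower_limit); inner loop scans range(wide)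
def xmas_tree (wide : Int) (tall : Int) : List (Int × Int) :=
  let s :=
    (PySem.List.pyRange 0 (tall - 1) 1).foldl
      (fun (st : List (Int × Int) × Int × Int) y =>
        let upper := st.2.1 + 1
        let lower := st.2.2 + (-1)
        let coords :=
          (PySem.List.pyRange 0 wide 1).foldl
            (fun acc x => if x < upper ∧ x > lower then acc ++ [(x, y)] else acc) st.1
        (coords, upper, lower))
      ([], PySem.Int.floordiv wide 2, PySem.Int.floordiv wide 2)
  s.1 ++ [(PySem.Int.floordiv wide 2, tall - 1)]

-- ===== PORT B =====
-- literal port of B: per row y extend with the clamped interval [max 0 (mid-y), min wide (mid+y+1))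
def xmas_tree_alt (wide : Int) (tall : Int) : List (Int × Int) :=
  let mid := PySem.Int.floordiv wide 2
  let coords :=
    (PySem.List.pyRange 0 (tall - 1) 1).foldl
      (fun acc y =>
        acc ++ (PySem.List.pyRange (max 0 (mid - y)) (min wide (mid + y + 1)) 1).map
                 (fun x => (x, y)))
      []
  coords ++ [(mid, tall - 1)]

-- ===== PRECONDITION & SPEC =====
def Spec_xmas_tree (wide : Int) (tall : Int) (out : List (Int × Int)) : Prop := out = xmas_tree_alt wide tall
instance (wide : Int) (tall : Int) (out : List (Int × Int)) : Decidable (Spec_xmas_tree wide tall out) := by unfold Spec_xmas_tree; infer_instance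

-- ===== CLAIM (what is proved, stated in full; the proofs are below) =====
def Claim_equal_xmas_tree : Prop := ∀ (wide : Int) (tall : Int), Dom_xmas_tree wide tall → Spec_xmas_tree wide tall (xmas_tree wide tall)

-- ===== LEMMAS AND PROOFS =====

-- range(0, b) = range(0, toNat b)  (both empty when b ≤ 0)
theorem pyRange_zero_toNat (b : Int) :
    PySem.List.pyRange 0 b 1 = PySem.List.pyRange 0 ((b.toNat : Int)) 1 := by
  rcases le_or_gt b 0 with h | h
  · rw [PySem.List.pyRange_one_eq_nil h, PySem.List.pyRange_one_eq_nil (by omega)]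
  · congr 1; omega

-- Prop-if version of foldl_append_if
theorem foldl_append_ite {α β : Type} (l : List α) (p : α → Prop) [DecidablePred p]
    (f : α → β) (acc : List β) :
    l.foldl (fun acc x => if p x then acc ++ [f x] else acc) acc
      = acc ++ (l.filter (fun x => decide (p x))).map f := by
  induction l generalizing acc with
  | nil => simp
  | cons a l ih =>
    simp only [List.foldl_cons, List.filter_cons]
    by_cases h : p a
    · simp [h, ih]
    · simp [h, ih]

-- the interval filter of a range is the clamped range
theorem filter_pyRange_interval (a b c d : Int) :
    (PySem.List.pyRange a b 1).filter (fun x => decide (c ≤ x ∧ x < d))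
      = PySem.List.pyRange (max a c) (min b d) 1 := by
  have hp1 : ((PySem.List.pyRange a b 1).filter (fun x => decide (c ≤ x ∧ x < d))).Pairwise (· < ·) :=
    (PySem.List.pairwise_lt_pyRange_one a b).filter _
  have hp2 : (PySem.List.pyRange (max a c) (min b d) 1).Pairwise (· < ·) :=
    PySem.List.pairwise_lt_pyRange_one _ _
  refine List.Perm.eq_of_pairwise' hp1 hp2 ?_
  refine (List.perm_ext_iff_of_nodup (hp1.imp ne_of_lt) (hp2.imp ne_of_lt)).2 ?_
  intro x
  simp [List.mem_filter, PySem.List.mem_pyRange_one]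
  omega

-- A's outer loop, unrolled from the right, produces B's flatMap and tracks upper/lower = mid ± n
theorem xmas_tree_loop (wide mid : Int) (n : Nat) :
    (PySem.List.pyRange 0 (n : Int) 1).foldl
      (fun (st : List (Int × Int) × Int × Int) y =>
        let upper := st.2.1 + 1
        let lower := st.2.2 + (-1)
        let coords :=
          (PySem.List.pyRange 0 wide 1).foldl
            (fun acc x => if x < upper ∧ x > lower then acc ++ [(x, y)] else acc) st.1
        (coords, upper, lower))
      ([], mid, mid)
      = ((PySem.List.pyRange 0 (n : Int) 1).foldl
          (fun acc y =>
            acc ++ (PySem.List.pyRange (max 0 (mid - y)) (min wide (mid + y + 1)) 1).map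
                     (fun x => (x, y)))
          [],
         mid + n, mid - n) := by
  induction n with
  | zero => simp [PySem.List.pyRange_one_eq_nil (by omega : (0:Int) ≤ 0)]
  | succ n ih =>
    have hsplit : PySem.List.pyRange 0 ((n + 1 : Nat) : Int) 1
        = PySem.List.pyRange 0 (n : Int) 1 ++ [(n : Int)] := by
      have hc : ((n + 1 : Nat) : Int) = (n : Int) + 1 := by push_cast; ring
      rw [hc]; exact PySem.List.pyRange_one_succ_right (by omega : (0:Int) ≤ (n:Int))
    rw [hsplit, List.foldl_append, List.foldl_append, ih]
    simp only [List.foldl_cons, List.foldl_nil]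
    refine Prod.ext ?_ (Prod.ext (by push_cast; ring) (by push_cast; ring))
    have hcond : ∀ (acc : List (Int × Int)),
        (PySem.List.pyRange 0 wide 1).foldl
          (fun acc x => if x < mid + (n:Int) + 1 ∧ x > mid - (n:Int) + (-1) then acc ++ [(x, (n:Int))] else acc) acc
        = acc ++ ((PySem.List.pyRange 0 wide 1).filter
            (fun x => decide (mid - (n:Int) ≤ x ∧ x < mid + (n:Int) + 1))).map (fun x => (x, (n:Int))) := by
      intro acc
      rw [foldl_append_ite (PySem.List.pyRange 0 wide 1)
          (fun x => x < mid + (n:Int) + 1 ∧ x > mid - (n:Int) + (-1)) (fun x => (x, (n:Int))) acc]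
      congr 1
      refine congrArg _ (List.filter_congr ?_)
      intro x _
      simp only [decide_eq_decide]
      omega
    simp only []
    rw [hcond]
    rw [filter_pyRange_interval 0 wide (mid - (n:Int)) (mid + (n:Int) + 1)]

-- ===== VERDICT (by name: the statement is the Claim_ definition above) =====
theorem xmas_tree_spec : Claim_equal_xmas_tree := by
  intro wide tall _
  unfold Spec_xmas_tree xmas_tree xmas_tree_alt
  rw [pyRange_zero_toNat (tall - 1)]
  rw [xmas_tree_loop wide (PySem.Int.floordiv wide 2) (tall - 1).toNat]
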